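-- pv_equiv track=rewrite | github.com/marvinmirtschin/Gaitomator | src/add_ins/segmentation/shen_2017.py | get_points_with_changing_gradient
-- ===== SOURCE A (Python) =====
-- def get_points_with_changing_gradient(data, number_of_comparisons=10):
--     """
--     Checks if the gradient of preceding values is increasing and the gradient of succeeding values decreasing.
--
--     Parameters
--     ----------
--     data: array-like
--         Data to be searched
--     number_of_comparisons: int, default=10
--         Number of elements to compare the current one with. Must be even. Default value is taken from the paper.
--
--     Returns
--     -------
--     peak_indices: array-like
--         Indices of values that meet the conditions
--
--     See Also
--     -------
--     get_points_with_changing_gradient_improved : Computationally improved version fo this method.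
--     """
--     peak_indices = list()
--     for index in range(len(data)):
--
--         sum_down = 0
--         start = max(0, int(index - (number_of_comparisons / 2)))
--         for i in range(start, index):
--             sum_down += data[i + 1] - data[i]
--
--         sum_up = 0
--         end = min(len(data), int(index + (number_of_comparisons / 2)) + 1)
--         for i in range(index + 1, end):
--             sum_up += data[i] - data[i - 1]
--
--         if sum_down > 0 > sum_up:
--             peak_indices.append(index)
--     return peak_indices
-- ===== SOURCE B (Python) =====
-- def get_points_with_changing_gradient(data, number_of_comparisons=10):
--     # Telescoped: each window's gradient sum collapses to an endpoint difference, O(n) total.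
--     n = len(data)
--     peaks = []
--     for index in range(n):
--         start = max(0, int(index - (number_of_comparisons / 2)))
--         end = min(n, int(index + (number_of_comparisons / 2)) + 1)
--         sum_down = data[index] - data[start] if start <= index else 0
--         sum_up = data[end - 1] - data[index] if end > index else 0
--         if sum_down > 0 > sum_up:
--             peaks.append(index)
--     return peaks
-- ===== Notes on version B (the rewrite author's own statement) =====
-- stated objective: faster
-- what changed: The two inner gradient-summing loops are telescoped into endpoint differences (data[index]-data[start] and data[end-1]-data[index]), turning O(n*k) into a single O(n) pass.
import Mathlib
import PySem

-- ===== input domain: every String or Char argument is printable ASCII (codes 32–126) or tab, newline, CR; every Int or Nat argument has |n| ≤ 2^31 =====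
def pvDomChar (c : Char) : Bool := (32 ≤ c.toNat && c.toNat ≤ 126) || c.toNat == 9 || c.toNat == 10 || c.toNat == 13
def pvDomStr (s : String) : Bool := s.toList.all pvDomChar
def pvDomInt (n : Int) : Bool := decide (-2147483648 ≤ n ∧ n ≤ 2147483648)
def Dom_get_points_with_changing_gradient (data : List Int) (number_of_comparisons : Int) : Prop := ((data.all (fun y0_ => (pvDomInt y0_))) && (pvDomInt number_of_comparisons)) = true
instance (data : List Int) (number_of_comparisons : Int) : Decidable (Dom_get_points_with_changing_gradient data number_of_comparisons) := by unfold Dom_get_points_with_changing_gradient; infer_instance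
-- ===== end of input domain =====

-- B telescopes each window's gradient sum to an endpoint difference (alternative: removes the two inner O(k) loops).

-- ===== PORT A =====
-- int(index - number_of_comparisons/2) : the float arithmetic is exact here and int() truncates
-- toward zero, which is PySem.Int.truncdiv of (2*index - number_of_comparisons) by 2.
-- data[i] accesses are always in range (start ≥ 0, loops bounded by len), so pyGetD is exact.
def get_points_with_changing_gradient (data : List Int) (number_of_comparisons : Int) : List Int :=
  (PySem.List.pyRange 0 (PySem.List.len data) 1).foldl (fun peak_indices index =>
    let start := max 0 (PySem.Int.truncdiv (2 * index - number_of_comparisons) 2)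
    let sum_down := (PySem.List.pyRange start index 1).foldl
      (fun s i => s + (PySem.List.pyGetD data (i + 1) 0 - PySem.List.pyGetD data i 0)) 0
    let endd := min (PySem.List.len data) (PySem.Int.truncdiv (2 * index + number_of_comparisons) 2 + 1)
    let sum_up := (PySem.List.pyRange (index + 1) endd 1).foldl
      (fun s i => s + (PySem.List.pyGetD data i 0 - PySem.List.pyGetD data (i - 1) 0)) 0
    if sum_down > 0 ∧ 0 > sum_up then peak_indices ++ [index] else peak_indices) []

-- ===== PORT B =====
def get_points_with_changing_gradient_alt (data : List Int) (number_of_comparisons : Int) : List Int :=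
  let n := PySem.List.len data
  (PySem.List.pyRange 0 n 1).foldl (fun peaks index =>
    let start := max 0 (PySem.Int.truncdiv (2 * index - number_of_comparisons) 2)
    let endd := min n (PySem.Int.truncdiv (2 * index + number_of_comparisons) 2 + 1)
    let sum_down := if start ≤ index then PySem.List.pyGetD data index 0 - PySem.List.pyGetD data start 0 else 0
    let sum_up := if index < endd then PySem.List.pyGetD data (endd - 1) 0 - PySem.List.pyGetD data index 0 else 0
    if sum_down > 0 ∧ 0 > sum_up then peaks ++ [index] else peaks) []

-- ===== PRECONDITION & SPEC =====
def Spec_get_points_with_changing_gradient (data : List Int) (number_of_comparisons : Int) (out : List Int) : Prop := out = get_points_with_changing_gradient_alt data number_of_comparisons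
instance (data : List Int) (number_of_comparisons : Int) (out : List Int) : Decidable (Spec_get_points_with_changing_gradient data number_of_comparisons out) := by unfold Spec_get_points_with_changing_gradient; infer_instance

-- ===== CLAIM (what is proved, stated in full; the proofs are below) =====
def Claim_equal_get_points_with_changing_gradient : Prop := ∀ (data : List Int) (number_of_comparisons : Int), Dom_get_points_with_changing_gradient data number_of_comparisons → Spec_get_points_with_changing_gradient data number_of_comparisons (get_points_with_changing_gradient data number_of_comparisons)

-- ===== LEMMAS AND PROOFS =====

-- Telescoping: Σ_{i=a}^{b-1} (g(i+1) - g(i)) = g b - g a  (any g, a ≤ b)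
theorem telescope_up (g : Int → Int) (a b : Int) (h : a ≤ b) (s : Int) :
    (PySem.List.pyRange a b 1).foldl (fun acc i => acc + (g (i + 1) - g i)) s = s + (g b - g a) := by
  obtain ⟨k, hk⟩ : ∃ k : Nat, b = a + k := ⟨(b - a).toNat, by omega⟩
  subst hk
  induction k generalizing a s with
  | zero =>
      rw [PySem.List.pyRange_one_eq_nil (by simp)]
      simp
  | succ m ih =>
      rw [PySem.List.pyRange_one_cons (by push_cast; omega)]
      simp only [List.foldl_cons]
      have := ih (a + 1) (s + (g (a + 1) - g a)) (by omega)
      push_cast at this ⊢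
      rw [show a + 1 + (m : Int) = a + ((m : Int) + 1) by ring] at this
      rw [this]; ring

-- Telescoping for the backward-difference form: Σ_{i=a}^{b-1} (g i - g (i-1)) = g (b-1) - g (a-1)
theorem telescope_down (g : Int → Int) (a b : Int) (h : a ≤ b) (s : Int) :
    (PySem.List.pyRange a b 1).foldl (fun acc i => acc + (g i - g (i - 1))) s = s + (g (b - 1) - g (a - 1)) := by
  have := telescope_up (fun i => g (i - 1)) a b h s
  simpa using this

theorem step_eq (data : List Int) (number_of_comparisons : Int) (peaks : List Int) (index : Int) :
    (let start := max 0 (PySem.Int.truncdiv (2 * index - number_of_comparisons) 2)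
     let sum_down := (PySem.List.pyRange start index 1).foldl
       (fun s i => s + (PySem.List.pyGetD data (i + 1) 0 - PySem.List.pyGetD data i 0)) 0
     let endd := min (PySem.List.len data) (PySem.Int.truncdiv (2 * index + number_of_comparisons) 2 + 1)
     let sum_up := (PySem.List.pyRange (index + 1) endd 1).foldl
       (fun s i => s + (PySem.List.pyGetD data i 0 - PySem.List.pyGetD data (i - 1) 0)) 0
     if sum_down > 0 ∧ 0 > sum_up then peaks ++ [index] else peaks)
    =
    (let start := max 0 (PySem.Int.truncdiv (2 * index - number_of_comparisons) 2)
     let endd := min (PySem.List.len data) (PySem.Int.truncdiv (2 * index + number_of_comparisons) 2 + 1)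
     let sum_down := if start ≤ index then PySem.List.pyGetD data index 0 - PySem.List.pyGetD data start 0 else 0
     let sum_up := if index < endd then PySem.List.pyGetD data (endd - 1) 0 - PySem.List.pyGetD data index 0 else 0
     if sum_down > 0 ∧ 0 > sum_up then peaks ++ [index] else peaks) := by
  simp only []
  set start := max 0 (PySem.Int.truncdiv (2 * index - number_of_comparisons) 2) with hstart
  set endd := min (PySem.List.len data) (PySem.Int.truncdiv (2 * index + number_of_comparisons) 2 + 1) with hend
  have hdown : (PySem.List.pyRange start index 1).foldl
      (fun s i => s + (PySem.List.pyGetD data (i + 1) 0 - PySem.List.pyGetD data i 0)) 0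
      = (if start ≤ index then PySem.List.pyGetD data index 0 - PySem.List.pyGetD data start 0 else 0) := by
    by_cases h : start ≤ index
    · rw [if_pos h, telescope_up (fun i => PySem.List.pyGetD data i 0) start index h 0]; ring
    · rw [if_neg h, PySem.List.pyRange_one_eq_nil (by omega)]; rfl
  have hup : (PySem.List.pyRange (index + 1) endd 1).foldl
      (fun s i => s + (PySem.List.pyGetD data i 0 - PySem.List.pyGetD data (i - 1) 0)) 0
      = (if index < endd then PySem.List.pyGetD data (endd - 1) 0 - PySem.List.pyGetD data index 0 else 0) := by
    by_cases h : index < endd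
    · rw [if_pos h, telescope_down (fun i => PySem.List.pyGetD data i 0) (index + 1) endd (by omega) 0]
      simp
    · rw [if_neg h, PySem.List.pyRange_one_eq_nil (by omega)]; rfl
  rw [hdown, hup]

-- ===== VERDICT (by name: the statement is the Claim_ definition above) =====
theorem get_points_with_changing_gradient_spec : Claim_equal_get_points_with_changing_gradient := by
  intro data number_of_comparisons _
  unfold Spec_get_points_with_changing_gradient
  unfold get_points_with_changing_gradient get_points_with_changing_gradient_alt
  congr 1
  funext peaks index
  exact step_eq data number_of_comparisons peaks index
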